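-- pv_equiv track=rewrite | github.com/jsgonzalez9/MenuScraper | Desktop/MenuScraper_Playwright/MenuScraper_Playwright/final_ml_menu_scraper.py | _assess_allergen_risk
-- ===== SOURCE A (Python) =====
-- from typing import Dict, List, Optional, Tuple, Any
--
-- def _assess_allergen_risk(allergens: List[str]) -> str:
--     """Assess allergen risk level"""
--     if not allergens:
--         return 'low'
--
--     high_risk_allergens = ['nuts', 'peanuts', 'shellfish', 'fish']
--     medium_risk_allergens = ['dairy', 'eggs', 'gluten']
--
--     if any(allergen in high_risk_allergens for allergen in allergens):
--         return 'high'
--     elif any(allergen in medium_risk_allergens for allergen in allergens):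
--         return 'medium'
--     else:
--         return 'low'
-- ===== SOURCE B (Python) =====
-- _CATEGORY = {
--     'nuts': 'high', 'peanuts': 'high', 'shellfish': 'high', 'fish': 'high',
--     'dairy': 'medium', 'eggs': 'medium', 'gluten': 'medium',
-- }
--
-- def _assess_allergen_risk(allergens):
--     """Assess allergen risk level: one pass building the set of categories present."""
--     present = set()
--     for a in allergens:
--         c = _CATEGORY.get(a)
--         if c is not None:
--             present.add(c)
--     if 'high' in present:
--         return 'high'
--     if 'medium' in present:
--         return 'medium'
--     return 'low'
-- ===== Notes on version B (the rewrite author's own statement) =====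
-- stated objective: alternative
-- what changed: Replaces the empty-check plus two independent any() scans over risk lists with a single pass that maps each allergen through one category dict into a set of present categories, followed by an order-independent priority decision.
import Mathlib
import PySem

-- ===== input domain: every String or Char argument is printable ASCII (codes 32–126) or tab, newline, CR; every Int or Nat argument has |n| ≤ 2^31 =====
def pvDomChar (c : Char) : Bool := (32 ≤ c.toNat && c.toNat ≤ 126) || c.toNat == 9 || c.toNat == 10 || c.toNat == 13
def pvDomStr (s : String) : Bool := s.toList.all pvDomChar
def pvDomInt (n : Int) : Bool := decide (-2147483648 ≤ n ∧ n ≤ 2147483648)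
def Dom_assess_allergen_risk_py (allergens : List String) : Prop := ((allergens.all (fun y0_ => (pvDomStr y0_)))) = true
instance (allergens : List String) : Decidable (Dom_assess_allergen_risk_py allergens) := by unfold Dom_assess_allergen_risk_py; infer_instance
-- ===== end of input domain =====

-- B builds the set of risk categories present in one dict-indexed pass instead of A's
-- empty-check plus two independent any() scans (objective: alternative decomposition).

-- ===== PORT A =====
def assess_allergen_risk_py (allergens : List String) : String :=
  if allergens = [] then "low"
  else
    let high_risk_allergens : List String := ["nuts", "peanuts", "shellfish", "fish"]
    let medium_risk_allergens : List String := ["dairy", "eggs", "gluten"]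
    if allergens.any (fun allergen => high_risk_allergens.contains allergen) then "high"
    else if allergens.any (fun allergen => medium_risk_allergens.contains allergen) then "medium"
    else "low"

-- ===== PORT B =====
def pvCategory : PySem.Dict String String :=
  PySem.Dict.ofList [("nuts", "high"), ("peanuts", "high"), ("shellfish", "high"), ("fish", "high"),
                     ("dairy", "medium"), ("eggs", "medium"), ("gluten", "medium")]

def assess_allergen_risk_py_alt (allergens : List String) : String :=
  let present : PySem.Set String :=
    allergens.foldl (fun s a =>
      match PySem.Dict.get? pvCategory a with
      | some c => PySem.Set.add s c
      | none => s) PySem.Set.empty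
  if PySem.Set.contains present "high" then "high"
  else if PySem.Set.contains present "medium" then "medium"
  else "low"

-- ===== PRECONDITION & SPEC =====
def Spec_assess_allergen_risk_py (allergens : List String) (out : String) : Prop := out = assess_allergen_risk_py_alt allergens
instance (allergens : List String) (out : String) : Decidable (Spec_assess_allergen_risk_py allergens out) := by unfold Spec_assess_allergen_risk_py; infer_instance

-- ===== CLAIM (what is proved, stated in full; the proofs are below) =====
def Claim_equal_assess_allergen_risk_py : Prop := ∀ (allergens : List String), Dom_assess_allergen_risk_py allergens → Spec_assess_allergen_risk_py allergens (assess_allergen_risk_py allergens)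

-- ===== LEMMAS AND PROOFS =====

theorem mem_foldl_cat (l : List String) (s : PySem.Set String) (x : String) :
    x ∈ l.foldl (fun s a =>
      match PySem.Dict.get? pvCategory a with
      | some c => PySem.Set.add s c
      | none => s) s ↔ x ∈ s ∨ ∃ a ∈ l, PySem.Dict.get? pvCategory a = some x := by
  induction l generalizing s with
  | nil => simp
  | cons a t ih =>
    simp only [List.foldl_cons, ih, List.mem_cons]
    cases h : PySem.Dict.get? pvCategory a with
    | none =>
      simp only
      constructor
      · rintro (hs | ⟨b, hb, hg⟩)
        · exact Or.inl hs
        · exact Or.inr ⟨b, Or.inr hb, hg⟩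
      · rintro (hs | ⟨b, (rfl | hb), hg⟩)
        · exact Or.inl hs
        · rw [h] at hg; cases hg
        · exact Or.inr ⟨b, hb, hg⟩
    | some c =>
      simp only [PySem.Set.mem_add]
      constructor
      · rintro ((hs | rfl) | ⟨b, hb, hg⟩)
        · exact Or.inl hs
        · exact Or.inr ⟨a, Or.inl rfl, h⟩
        · exact Or.inr ⟨b, Or.inr hb, hg⟩
      · rintro (hs | ⟨b, (rfl | hb), hg⟩)
        · exact Or.inl (Or.inl hs)
        · rw [h] at hg; injection hg with hc; exact Or.inl (Or.inr hc.symm)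
        · exact Or.inr ⟨b, hb, hg⟩

theorem cat_eval : pvCategory = PySem.Dict.mk [("nuts", "high"), ("peanuts", "high"), ("shellfish", "high"), ("fish", "high"), ("dairy", "medium"), ("eggs", "medium"), ("gluten", "medium")] := by
  decide

theorem cat_high (a : String) :
    PySem.Dict.get? pvCategory a = some "high" ↔
      a ∈ (["nuts", "peanuts", "shellfish", "fish"] : List String) := by
  rw [cat_eval]
  simp only [PySem.Dict.get?_mk_cons, beq_iff_eq, List.mem_cons, List.not_mem_nil, or_false]
  split_ifs with h1 h2 h3 h4 h5 h6 h7 <;> simp_all [PySem.Dict.get?, eq_comm]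

theorem cat_medium (a : String) :
    PySem.Dict.get? pvCategory a = some "medium" ↔
      a ∈ (["dairy", "eggs", "gluten"] : List String) := by
  rw [cat_eval]
  simp only [PySem.Dict.get?_mk_cons, beq_iff_eq, List.mem_cons, List.not_mem_nil, or_false]
  split_ifs with h1 h2 h3 h4 h5 h6 h7 <;> simp_all [PySem.Dict.get?, eq_comm]

-- ===== VERDICT (by name: the statement is the Claim_ definition above) =====
theorem assess_allergen_risk_py_spec : Claim_equal_assess_allergen_risk_py := by
  intro allergens _
  unfold Spec_assess_allergen_risk_py assess_allergen_risk_py assess_allergen_risk_py_alt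
  have hhigh : (allergens.any fun allergen =>
        (["nuts", "peanuts", "shellfish", "fish"] : List String).contains allergen) =
      PySem.Set.contains (allergens.foldl (fun s a =>
        match PySem.Dict.get? pvCategory a with
        | some c => PySem.Set.add s c
        | none => s) PySem.Set.empty) "high" := by
    rw [Bool.eq_iff_iff]
    simp only [PySem.Set.contains_iff, mem_foldl_cat, List.any_eq_true, List.contains_eq_mem,
      decide_eq_true_eq, cat_high, PySem.Set.empty]
    simp
  have hmed : (allergens.any fun allergen =>
        (["dairy", "eggs", "gluten"] : List String).contains allergen) =
      PySem.Set.contains (allergens.foldl (fun s a =>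
        match PySem.Dict.get? pvCategory a with
        | some c => PySem.Set.add s c
        | none => s) PySem.Set.empty) "medium" := by
    rw [Bool.eq_iff_iff]
    simp only [PySem.Set.contains_iff, mem_foldl_cat, List.any_eq_true, List.contains_eq_mem,
      decide_eq_true_eq, cat_medium, PySem.Set.empty]
    simp
  by_cases hnil : allergens = []
  · subst hnil; decide
  · simp only [if_neg hnil, hhigh, hmed]
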